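-- pv_equiv track=rewrite | github.com/5tefan543/CTCS_05 | measurement_results/create-plots.py | rename_and_reorder_benchmarks
-- ===== SOURCE A (Python) =====
-- from collections import OrderedDict
--
-- def rename_and_reorder_benchmarks(benchmark_data):
--     # Mapping for renaming SciMark2 tests
--     rename_mapping = {
--         "SciMark2: SMM": "SMM",
--         "SciMark2: FFT": "FFT",
--         "SciMark2: LU": "LU",
--         "SciMark2: MonteCarlo": "MonteCarlo",
--         "SciMark2: SOR": "SOR",
--         "Plane": "Raytracer"
--     }
--
--     # Reordering list
--     reorder_list = ["FFT", "SOR", "MonteCarlo", "SMM", "LU", "ZXing", "jME", "ImageJ", "Raytracer"]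
--
--     # Rename benchmarks
--     renamed_data = {}
--     for key, value in benchmark_data.items():
--         new_key = rename_mapping.get(key, key)  # Use mapping if available, otherwise keep original
--         renamed_data[new_key] = value
--
--     # Reorder benchmarks
--     ordered_data = OrderedDict()
--     for test_name in reorder_list:
--         if test_name in renamed_data:
--             ordered_data[test_name] = renamed_data[test_name]
--
--     # Add remaining benchmarks (not in the reorder list) to the end
--     for key in renamed_data:
--         if key not in ordered_data:
--             ordered_data[key] = renamed_data[key]
--
--     return ordered_data
-- ===== SOURCE B (Python) =====
-- from collections import OrderedDict
--
-- def rename_and_reorder_benchmarks(benchmark_data):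
--     rename_mapping = {
--         "SciMark2: SMM": "SMM",
--         "SciMark2: FFT": "FFT",
--         "SciMark2: LU": "LU",
--         "SciMark2: MonteCarlo": "MonteCarlo",
--         "SciMark2: SOR": "SOR",
--         "Plane": "Raytracer"
--     }
--     reorder_list = ["FFT", "SOR", "MonteCarlo", "SMM", "LU", "ZXing", "jME", "ImageJ", "Raytracer"]
--
--     renamed_data = {rename_mapping.get(k, k): v for k, v in benchmark_data.items()}
--     order = {name: i for i, name in enumerate(reorder_list)}
--     return OrderedDict(sorted(renamed_data.items(),
--                               key=lambda kv: order.get(kv[0], len(reorder_list))))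
-- ===== Notes on version B (the rewrite author's own statement) =====
-- stated objective: idiomatic
-- what changed: B replaces A's two explicit reordering loops (scan the reorder list picking present keys, then re-scan the renamed dict for leftovers) by one stable sort of the renamed items under a precomputed name-to-priority map, with a constant fallback priority so leftover keys keep insertion order.
import Mathlib
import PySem

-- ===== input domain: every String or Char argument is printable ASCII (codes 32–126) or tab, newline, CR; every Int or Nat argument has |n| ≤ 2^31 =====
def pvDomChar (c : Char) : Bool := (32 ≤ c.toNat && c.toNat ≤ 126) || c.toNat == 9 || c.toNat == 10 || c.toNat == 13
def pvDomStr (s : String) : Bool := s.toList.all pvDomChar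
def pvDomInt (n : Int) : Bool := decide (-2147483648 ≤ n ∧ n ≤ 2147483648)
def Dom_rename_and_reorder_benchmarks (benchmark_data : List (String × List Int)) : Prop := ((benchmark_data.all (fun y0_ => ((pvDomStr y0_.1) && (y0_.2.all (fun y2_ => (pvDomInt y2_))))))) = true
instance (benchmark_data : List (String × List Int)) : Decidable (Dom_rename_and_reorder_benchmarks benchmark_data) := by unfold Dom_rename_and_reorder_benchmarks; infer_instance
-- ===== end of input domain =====

-- B replaces A's two reordering loops by one stable sort under a precomputed priority map (idiomatic; same behaviour).

-- ===== PORT A =====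
-- the literal constants both sources define
def pvRenameMapping : PySem.Dict String String :=
  PySem.Dict.ofList [("SciMark2: SMM", "SMM"), ("SciMark2: FFT", "FFT"), ("SciMark2: LU", "LU"),
    ("SciMark2: MonteCarlo", "MonteCarlo"), ("SciMark2: SOR", "SOR"), ("Plane", "Raytracer")]

def pvReorderList : List String :=
  ["FFT", "SOR", "MonteCarlo", "SMM", "LU", "ZXing", "jME", "ImageJ", "Raytracer"]

def rename_and_reorder_benchmarks (benchmark_data : List (String × List Int)) : List (String × List Int) :=
  -- for key, value in benchmark_data.items(): renamed_data[rename_mapping.get(key, key)] = value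
  let renamed_data : PySem.Dict String (List Int) :=
    benchmark_data.foldl (fun d kv => d.insert (pvRenameMapping.getD kv.1 kv.1) kv.2) PySem.Dict.empty
  -- for test_name in reorder_list: if test_name in renamed_data: ordered_data[test_name] = renamed_data[test_name]
  let ordered_data : PySem.Dict String (List Int) :=
    pvReorderList.foldl (fun od n =>
      match renamed_data.get? n with
      | some v => od.insert n v
      | none => od) PySem.Dict.empty
  -- for key in renamed_data: if key not in ordered_data: ordered_data[key] = renamed_data[key]
  -- (iterating the dict's keys and indexing it = iterating its (key, value) items)
  let ordered_data2 : PySem.Dict String (List Int) :=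
    renamed_data.items.foldl (fun od kv => if od.contains kv.1 then od else od.insert kv.1 kv.2) ordered_data
  ordered_data2.items

-- ===== PORT B =====
def rename_and_reorder_benchmarks_alt (benchmark_data : List (String × List Int)) : List (String × List Int) :=
  -- renamed_data = {rename_mapping.get(k, k): v for k, v in benchmark_data.items()}
  let renamed_data : PySem.Dict String (List Int) :=
    PySem.Dict.ofList (benchmark_data.map (fun kv => (pvRenameMapping.getD kv.1 kv.1, kv.2)))
  -- order = {name: i for i, name in enumerate(reorder_list)}
  let order : PySem.Dict String Int :=
    PySem.Dict.ofList ((PySem.List.enumerate pvReorderList).map (fun p => (p.2, p.1)))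
  -- OrderedDict(sorted(renamed_data.items(), key=lambda kv: order.get(kv[0], len(reorder_list))))
  (PySem.Dict.ofList (PySem.List.sorted renamed_data.items
      (fun kv => order.getD kv.1 (pvReorderList.length : Int)))).items

-- ===== PRECONDITION & SPEC =====
def Spec_rename_and_reorder_benchmarks (benchmark_data : List (String × List Int)) (out : List (String × List Int)) : Prop := out = rename_and_reorder_benchmarks_alt benchmark_data
instance (benchmark_data : List (String × List Int)) (out : List (String × List Int)) : Decidable (Spec_rename_and_reorder_benchmarks benchmark_data out) := by unfold Spec_rename_and_reorder_benchmarks; infer_instance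

-- ===== CLAIM (what is proved, stated in full; the proofs are below) =====
def Claim_equal_rename_and_reorder_benchmarks : Prop := ∀ (benchmark_data : List (String × List Int)), Dom_rename_and_reorder_benchmarks benchmark_data → Spec_rename_and_reorder_benchmarks benchmark_data (rename_and_reorder_benchmarks benchmark_data)

-- ===== LEMMAS AND PROOFS =====

theorem pv_insertBy_split {α : Type} (before : α → α → Bool) (x : α) (l1 l2 : List α)
    (h1 : ∀ a ∈ l1, before x a = false) (h2 : ∀ a ∈ l2, before x a = true) :
    PySem.List.insertBy before x (l1 ++ l2) = l1 ++ x :: l2 := by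
  induction l1 with
  | nil =>
    cases l2 with
    | nil => rfl
    | cons b t => simp [PySem.List.insertBy, h2 b (by simp)]
  | cons a t ih =>
    simp only [List.cons_append, PySem.List.insertBy, h1 a (by simp)]
    simp only [Bool.false_eq_true, if_false, List.cons.injEq, true_and]
    exact ih (fun a ha => h1 a (by simp [ha]))

theorem pv_sorted_buckets {α : Type} (key : α → Int) (vals : List Int)
    (hv : vals.Pairwise (· < ·)) :
    ∀ (xs : List α), (∀ x ∈ xs, key x ∈ vals) →
      PySem.List.sorted xs key = vals.flatMap (fun i => xs.filter (fun x => key x == i)) := by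
  intro xs
  induction xs using List.reverseRecOn with
  | nil =>
    intro _
    simp [PySem.List.sorted]
  | append_singleton xs x ih =>
    intro hmem
    have hx : key x ∈ vals := hmem x (by simp)
    obtain ⟨v1, v2, hsplit⟩ := List.append_of_mem hx
    have hv' := hv
    rw [hsplit] at hv'
    rw [List.pairwise_append] at hv'
    obtain ⟨hp1, hp2, hcross⟩ := hv'
    have hlt1 : ∀ a ∈ v1, a < key x := fun a ha => hcross a ha (key x) (by simp)
    have hlt2 : ∀ a ∈ v2, key x < a := by
      rw [List.pairwise_cons] at hp2
      exact hp2.1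
    rw [PySem.List.sorted_eq_foldl_insertBy, List.foldl_append,
        ← PySem.List.sorted_eq_foldl_insertBy,
        ih (fun y hy => hmem y (by simp [hy]))]
    simp only [List.foldl_cons, List.foldl_nil]
    rw [hsplit]
    rw [List.flatMap_append, List.flatMap_cons]
    rw [← List.append_assoc]
    rw [pv_insertBy_split _ x
      (v1.flatMap (fun i => xs.filter (fun y => key y == i)) ++ xs.filter (fun y => key y == key x))
      (v2.flatMap (fun i => xs.filter (fun y => key y == i)))
      (by
        intro a ha
        simp only [List.mem_append, List.mem_flatMap, List.mem_filter] at ha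
        rcases ha with ⟨i, hi, _, hk⟩ | ⟨_, hk⟩
        · have hia : key a = i := by simpa using hk
          have := hlt1 i hi
          simp [hia]
          omega
        · have hia : key a = key x := by simpa using hk
          simp [hia])
      (by
        intro a ha
        simp only [List.mem_flatMap, List.mem_filter] at ha
        obtain ⟨i, hi, _, hk⟩ := ha
        have hia : key a = i := by simpa using hk
        have := hlt2 i hi
        simp [hia]
        omega)]
    rw [List.flatMap_append, List.flatMap_cons]
    have e1 : ∀ i ∈ v1, List.filter (fun y => key y == i) (xs ++ [x]) = List.filter (fun y => key y == i) xs := by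
      intro i hi
      rw [List.filter_append]
      have : (key x == i) = false := by
        have := hlt1 i hi
        simp
        omega
      simp [this]
    have e2 : ∀ i ∈ v2, List.filter (fun y => key y == i) (xs ++ [x]) = List.filter (fun y => key y == i) xs := by
      intro i hi
      rw [List.filter_append]
      have : (key x == i) = false := by
        have := hlt2 i hi
        simp
        omega
      simp [this]
    rw [List.flatMap_congr e1, List.flatMap_congr e2]
    rw [List.filter_append]
    simp


-- ofList of a list with distinct keys keeps it as-is
theorem pv_items_ofList {κ ν : Type} [BEq κ] [LawfulBEq κ] (l : List (κ × ν))
    (h : (l.map Prod.fst).Nodup) : (PySem.Dict.ofList l).items = l := by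
  have := PySem.Dict.items_foldl_insert_fresh l Prod.fst Prod.snd PySem.Dict.empty
    (fun a _ => by simp [PySem.Dict.contains_empty]) h
  simpa [PySem.Dict.ofList, PySem.Dict.update] using this

def pvKEY (RL : List String) (s : String) : Int :=
  match PySem.List.index? RL s with
  | some i => (i : Int)
  | none => (RL.length : Int)

theorem pvKEY_of_some {RL : List String} {s : String} {i : Nat}
    (h : PySem.List.index? RL s = some i) : pvKEY RL s = (i : Int) := by
  unfold pvKEY; rw [h]

theorem pvKEY_of_none {RL : List String} {s : String}
    (h : PySem.List.index? RL s = none) : pvKEY RL s = (RL.length : Int) := by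
  unfold pvKEY; rw [h]

theorem pv_order_get? (RL : List String) : ∀ (s0 : Int) (k : String),
    (PySem.Dict.mk ((PySem.List.enumerate RL s0).map (fun p => (p.2, p.1)))).get? k
      = (PySem.List.index? RL k).map (fun i => s0 + (i : Int)) := by
  induction RL with
  | nil => intro s0 k; simp [PySem.List.enumerate, PySem.List.index?, PySem.Dict.get?]
  | cons x t ih =>
    intro s0 k
    rw [PySem.List.enumerate_cons]
    simp only [List.map_cons]
    rw [PySem.Dict.get?_mk_cons]
    by_cases hx : x = k
    · subst hx
      have hidx : PySem.List.index? (x :: t) x = some 0 := by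
        rw [PySem.List.index?_eq_some_iff]
        exact ⟨[], t, by simp⟩
      rw [hidx]
      simp
    · have hb : (x == k) = false := by simpa using hx
      rw [hb]
      simp only [Bool.false_eq_true, if_false]
      rw [ih (s0 + 1) k, PySem.List.index?_cons_of_ne t hx]
      cases PySem.List.index? t k with
      | none => simp
      | some i => simp; omega

theorem pv_index?_lt {RL : List String} {s : String} {i : Nat}
    (h : PySem.List.index? RL s = some i) : i < RL.length := by
  rw [PySem.List.index?_eq_some_iff] at h
  obtain ⟨pre, suf, hRL, hlen, _⟩ := h
  subst hRL; simp [← hlen]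

theorem pvKEY_eq_len_iff (RL : List String) (s : String) :
    pvKEY RL s = (RL.length : Int) ↔ s ∉ RL := by
  cases h : PySem.List.index? RL s with
  | none =>
    rw [pvKEY_of_none h]
    simp only [true_iff]
    rw [PySem.List.index?_eq_idxOf?, List.idxOf?_eq_none_iff] at h
    exact h
  | some i =>
    rw [pvKEY_of_some h]
    have hi := pv_index?_lt h
    constructor
    · intro he; exfalso; omega
    · intro hnm
      exfalso
      obtain ⟨hk, hget, _⟩ := PySem.List.getElem_of_index?_eq_some h
      exact hnm (hget ▸ List.getElem_mem hk)

theorem pvKEY_bounds (RL : List String) (s : String) :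
    0 ≤ pvKEY RL s ∧ pvKEY RL s ≤ (RL.length : Int) := by
  cases h : PySem.List.index? RL s with
  | none => rw [pvKEY_of_none h]; constructor <;> simp
  | some i =>
    rw [pvKEY_of_some h]
    have := pv_index?_lt h
    constructor
    · positivity
    · omega

theorem pvKEY_eq_iff (RL : List String) (hnd : RL.Nodup) (s : String) (i : Nat) (hi : i < RL.length) :
    pvKEY RL s = (i : Int) ↔ s = RL[i] := by
  constructor
  · intro h
    cases hidx : PySem.List.index? RL s with
    | none =>
      rw [pvKEY_of_none hidx] at h
      have : RL.length = i := by exact_mod_cast h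
      omega
    | some j =>
      rw [pvKEY_of_some hidx] at h
      have : j = i := by exact_mod_cast h
      subst this
      obtain ⟨hk, hget, _⟩ := PySem.List.getElem_of_index?_eq_some hidx
      exact hget.symm
  · intro h
    subst h
    have hidx : PySem.List.index? RL RL[i] = some i := by
      rw [PySem.List.index?_eq_some_iff]
      refine ⟨RL.take i, RL.drop (i + 1), ?_, by simp [List.length_take]; omega, ?_⟩
      · rw [List.getElem_cons_drop hi, List.take_append_drop]
      · intro hmem
        obtain ⟨j, hj, hget⟩ := List.getElem_of_mem hmem
        have hjlt : j < i := by have := hj; simp [List.length_take] at this; omega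
        rw [List.getElem_take] at hget
        have : j = i := (List.Nodup.getElem_inj_iff hnd).mp hget
        omega
    exact pvKEY_of_some hidx

theorem pv_filter_eq_find? {ν : Type} (n : String) : ∀ (l : List (String × ν)),
    (l.map Prod.fst).Nodup →
    l.filter (fun kv => kv.1 == n) = ((l.find? (fun p => p.1 == n)).map (fun p => (n, p.2))).toList := by
  intro l
  induction l with
  | nil => intro _; rfl
  | cons kv t ih =>
    intro hnd
    simp only [List.map_cons, List.nodup_cons] at hnd
    by_cases h : kv.1 = n
    · have hb : (kv.1 == n) = true := by simpa using h
      have ht : t.filter (fun kv => kv.1 == n) = [] := by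
        rw [List.filter_eq_nil_iff]
        intro p hp hpb
        have : p.1 = n := by simpa using hpb
        exact hnd.1 (by rw [h, ← this]; exact List.mem_map_of_mem hp)
      simp only [List.filter_cons, List.find?_cons, hb, if_true, ht]
      simp [← h]
    · have hb : (kv.1 == n) = false := by simpa using h
      simp only [List.filter_cons, List.find?_cons, hb, Bool.false_eq_true, if_false]
      exact ih hnd.2

theorem pv_ordered1_items (R : PySem.Dict String (List Int)) :
    ∀ (ns : List String) (od : PySem.Dict String (List Int)), ns.Nodup →
      (∀ n ∈ ns, od.contains n = false) →
      (ns.foldl (fun od n =>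
        match R.get? n with
        | some v => od.insert n v
        | none => od) od).items
      = od.items ++ ns.filterMap (fun n => (R.get? n).map (fun v => (n, v))) := by
  intro ns
  induction ns with
  | nil => intro od _ _; simp
  | cons n t ih =>
    intro od hnd hdis
    simp only [List.nodup_cons] at hnd
    simp only [List.foldl_cons, List.filterMap_cons]
    cases hR : R.get? n with
    | none =>
            exact ih od hnd.2 (fun m hm => hdis m (by simp [hm]))
    | some v =>
      simp only [Option.map_some]
      rw [ih (od.insert n v) hnd.2 ?hdis]
      · rw [PySem.Dict.items_insert_of_not_contains od v (hdis n (by simp))]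
        simp
      case hdis =>
        intro m hm
        rw [PySem.Dict.contains_insert]
        have h1 : (m == n) = false := by
          simp only [beq_eq_false_iff_ne, ne_eq]
          intro he; exact hnd.1 (he ▸ hm)
        rw [h1, hdis m (by simp [hm])]
        rfl

theorem pv_ordered2_items : ∀ (l : List (String × List Int)) (od : PySem.Dict String (List Int)),
    (l.map Prod.fst).Nodup →
    (l.foldl (fun od kv => if od.contains kv.1 then od else od.insert kv.1 kv.2) od).items
      = od.items ++ l.filter (fun kv => !od.contains kv.1) := by
  intro l
  induction l with
  | nil => intro od _; simp
  | cons kv t ih =>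
    intro od hnd
    simp only [List.map_cons, List.nodup_cons] at hnd
    simp only [List.foldl_cons]
    by_cases h : od.contains kv.1
    · rw [if_pos h, List.filter_cons_of_neg (by simp [h]), ih od hnd.2]
    · rw [if_neg h, List.filter_cons_of_pos (by simp [Bool.eq_false_iff.mpr h])]
      rw [ih (od.insert kv.1 kv.2) hnd.2]
      rw [PySem.Dict.items_insert_of_not_contains od kv.2 (Bool.eq_false_iff.mpr h)]
      rw [List.filter_congr (q := fun p => !od.contains p.1) ?hq]
      · simp
      case hq =>
        intro p hp
        rw [PySem.Dict.contains_insert]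
        have : (p.1 == kv.1) = false := by
          simp only [beq_eq_false_iff_ne, ne_eq]
          intro he; exact hnd.1 (he ▸ List.mem_map_of_mem hp)
        rw [this]
        rfl

theorem pv_filterMap_eq_flatMap_range {β γ : Type} : ∀ (l : List β) (f : β → Option γ),
    (List.range l.length).flatMap (fun i => (l[i]?.elim [] (fun x => (f x).toList)))
      = l.filterMap f := by
  intro l
  induction l with
  | nil => intro f; rfl
  | cons x t ih =>
    intro f
    rw [List.length_cons, List.range_succ_eq_map, List.flatMap_cons, List.flatMap_map]
    simp only [List.getElem?_cons_succ, List.getElem?_cons_zero, Option.elim_some]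
    rw [ih f, List.filterMap_cons]
    cases f x <;> simp

theorem pv_main : ∀ (bd : List (String × List Int)),
    rename_and_reorder_benchmarks bd = rename_and_reorder_benchmarks_alt bd := by
  intro bd
  -- shared renamed dict
  set R : PySem.Dict String (List Int) :=
    bd.foldl (fun d kv => d.insert (pvRenameMapping.getD kv.1 kv.1) kv.2) PySem.Dict.empty with hR
  have hRkeys : R.keys.Nodup := by
    rw [hR]
    exact PySem.Dict.nodup_keys_foldl_insert_key bd (fun kv => pvRenameMapping.getD kv.1 kv.1)
      (fun d kv => kv.2) PySem.Dict.empty (by simp [PySem.Dict.keys_empty])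
  have hRnodup : (R.items.map Prod.fst).Nodup := hRkeys
  -- B's renamed dict is R
  have hren : PySem.Dict.ofList (bd.map (fun kv => (pvRenameMapping.getD kv.1 kv.1, kv.2))) = R := by
    rw [hR]
    simp [PySem.Dict.ofList, PySem.Dict.update, List.foldl_map]
  -- the priority dict looks up pvKEY
  have hordnd : ((((PySem.List.enumerate pvReorderList 0).map (fun p => (p.2, p.1))).map Prod.fst)).Nodup := by
    rw [List.map_map]
    have he : (Prod.fst ∘ (fun p : Int × String => (p.2, p.1))) = fun p => p.2 := rfl
    rw [he, PySem.List.map_snd_enumerate]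
    decide
  have hordmk : PySem.Dict.ofList ((PySem.List.enumerate pvReorderList 0).map (fun p => (p.2, p.1)))
      = PySem.Dict.mk ((PySem.List.enumerate pvReorderList 0).map (fun p => (p.2, p.1))) := by
    apply PySem.Dict.ext
    rw [pv_items_ofList _ hordnd]
  have hord : ∀ s : String,
      (PySem.Dict.ofList ((PySem.List.enumerate pvReorderList 0).map (fun p => (p.2, p.1)))).getD s
        ((pvReorderList.length : Int)) = pvKEY pvReorderList s := by
    intro s
    rw [hordmk]
    show ((PySem.Dict.mk _).get? s).getD _ = _
    rw [pv_order_get? pvReorderList 0 s]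
    unfold pvKEY
    cases PySem.List.index? pvReorderList s with
    | none => rfl
    | some i => simp
  -- B unfolded to a stable sort of R.items under pvKEY
  have hB : rename_and_reorder_benchmarks_alt bd
      = (PySem.Dict.ofList (PySem.List.sorted R.items (fun kv => pvKEY pvReorderList kv.1))).items := by
    show (PySem.Dict.ofList (PySem.List.sorted
        (PySem.Dict.ofList (bd.map (fun kv => (pvRenameMapping.getD kv.1 kv.1, kv.2)))).items
        (fun kv => (PySem.Dict.ofList ((PySem.List.enumerate pvReorderList 0).map (fun p => (p.2, p.1)))).getD kv.1
          (pvReorderList.length : Int)))).items = _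
    rw [hren]
    have hk : (fun kv : String × List Int =>
        (PySem.Dict.ofList ((PySem.List.enumerate pvReorderList 0).map (fun p => (p.2, p.1)))).getD kv.1
          (pvReorderList.length : Int)) = fun kv => pvKEY pvReorderList kv.1 := by
      funext kv; exact hord kv.1
    rw [hk]
  -- drop the outer OrderedDict wrapper on B's side
  have hsortnd : ((PySem.List.sorted R.items (fun kv => pvKEY pvReorderList kv.1)).map Prod.fst).Nodup := by
    have hp := PySem.List.sorted_perm R.items (fun kv => pvKEY pvReorderList kv.1) false
    exact ((hp.map Prod.fst).nodup_iff).mpr hRnodup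
  rw [hB, pv_items_ofList _ hsortnd]
  -- bucket decomposition of the stable sort
  have hmem : ∀ kv ∈ R.items, pvKEY pvReorderList kv.1 ∈ (List.range 10).map (Nat.cast : Nat → Int) := by
    intro kv _
    have hb := pvKEY_bounds pvReorderList kv.1
    have h9 : (pvReorderList.length : Int) = 9 := rfl
    simp only [List.mem_map, List.mem_range]
    exact ⟨(pvKEY pvReorderList kv.1).toNat, by omega, Int.toNat_of_nonneg hb.1⟩
  rw [pv_sorted_buckets _ ((List.range 10).map (Nat.cast : Nat → Int)) (by decide) R.items hmem]
  rw [List.flatMap_map]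
  rw [show (10 : Nat) = 9 + 1 from rfl, List.range_succ, List.flatMap_append,
      List.flatMap_cons, List.flatMap_nil, List.append_nil]
  -- A's side: first loop picks, second loop appends the leftovers
  have hod1items : (pvReorderList.foldl (fun od n =>
        match R.get? n with
        | some v => od.insert n v
        | none => od) PySem.Dict.empty).items
      = pvReorderList.filterMap (fun n => (R.get? n).map (fun v => (n, v))) := by
    have := pv_ordered1_items R pvReorderList PySem.Dict.empty (by decide)
      (fun n _ => PySem.Dict.contains_empty n)
    simpa using this
  have hod1 : (pvReorderList.foldl (fun od n =>
        match R.get? n with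
        | some v => od.insert n v
        | none => od) PySem.Dict.empty)
      = PySem.Dict.mk (pvReorderList.filterMap (fun n => (R.get? n).map (fun v => (n, v)))) :=
    PySem.Dict.ext (by rw [hod1items])
  have hA : rename_and_reorder_benchmarks bd
      = pvReorderList.filterMap (fun n => (R.get? n).map (fun v => (n, v)))
        ++ R.items.filter (fun kv =>
            !(PySem.Dict.mk (pvReorderList.filterMap (fun n => (R.get? n).map (fun v => (n, v))))).contains kv.1) := by
    show (R.items.foldl (fun od kv => if od.contains kv.1 then od else od.insert kv.1 kv.2)
        (pvReorderList.foldl (fun od n =>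
          match R.get? n with
          | some v => od.insert n v
          | none => od) PySem.Dict.empty)).items = _
    rw [pv_ordered2_items R.items _ hRnodup, hod1items, hod1]
  rw [hA]
  congr 1
  -- the first nine buckets are exactly A's picks, in reorder order
  · have hcomp : ∀ i ∈ List.range 9,
        R.items.filter (fun kv => pvKEY pvReorderList kv.1 == ((i : Nat) : Int))
        = (pvReorderList[i]?.elim [] (fun nm => ((R.get? nm).map (fun v => (nm, v))).toList)) := by
      intro i hi
      have hi9 : i < 9 := List.mem_range.mp hi
      have hgl : pvReorderList[i]? = some pvReorderList[i] := List.getElem?_eq_getElem (by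
        show i < pvReorderList.length
        simpa using hi9)
      rw [hgl]
      simp only [Option.elim_some]
      rw [List.filter_congr (q := fun kv => kv.1 == pvReorderList[i]) (by
        intro kv _
        rw [Bool.eq_iff_iff]
        simp only [beq_iff_eq]
        exact pvKEY_eq_iff pvReorderList (by decide) kv.1 i (by simpa using hi9))]
      rw [pv_filter_eq_find? _ _ hRnodup]
      show _ = ((Option.map (fun x => x.2) (List.find? (fun p => p.1 == pvReorderList[i]) R.items)).map
        (fun v => (pvReorderList[i], v))).toList
      rw [Option.map_map]
      rfl
    rw [List.flatMap_congr hcomp,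
        show (9 : Nat) = pvReorderList.length from rfl,
        pv_filterMap_eq_flatMap_range]
  -- the fallback bucket is exactly A's leftover loop
  · apply List.filter_congr
    intro kv hkv
    have hkv' : (kv.1, kv.2) ∈ R.items := by simpa using hkv
    have hsome : R.get? kv.1 = some kv.2 := PySem.Dict.get?_of_mem_items R hkv' hRkeys
    have hpicks : kv.1 ∈ (PySem.Dict.mk (pvReorderList.filterMap
        (fun n => (R.get? n).map (fun v => (n, v))))).keys ↔ kv.1 ∈ pvReorderList := by
      show kv.1 ∈ (pvReorderList.filterMap (fun n => (R.get? n).map (fun v => (n, v)))).map Prod.fst ↔ _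
      constructor
      · intro h
        obtain ⟨p, hp, hfst⟩ := List.mem_map.mp h
        obtain ⟨n, hn, hopt⟩ := List.mem_filterMap.mp hp
        obtain ⟨v, _, hv⟩ := Option.map_eq_some_iff.mp hopt
        rw [← hfst, ← hv]
        exact hn
      · intro h
        refine List.mem_map.mpr ⟨(kv.1, kv.2), List.mem_filterMap.mpr ⟨kv.1, h, ?_⟩, rfl⟩
        rw [hsome]
        rfl
    rw [Bool.eq_iff_iff]
    simp only [beq_iff_eq, Bool.not_eq_eq_eq_not, Bool.not_true, ← Bool.not_eq_true]
    rw [PySem.Dict.contains_eq_decide_mem_keys]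
    have h9 : ((9 : Nat) : Int) = (pvReorderList.length : Int) := rfl
    rw [h9, pvKEY_eq_len_iff]
    simp
    constructor
    · intro h hm
      exact h hm kv.2 hsome
    · intro h hm
      exact absurd hm h


-- ===== VERDICT (by name: the statement is the Claim_ definition above) =====
theorem rename_and_reorder_benchmarks_spec : Claim_equal_rename_and_reorder_benchmarks := by
  intro bd _
  unfold Spec_rename_and_reorder_benchmarks
  exact pv_main bd
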